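-- pv_equiv track=rewrite | github.com/bbugyi200/dotfiles | home/lib/gai/src/status_state_machine.py | _apply_status_update
-- ===== SOURCE A (Python) =====
-- def _apply_status_update(
--     lines: list[str], changespec_name: str, new_status: str
-- ) -> str:
--     """Apply STATUS field update to file lines.
--
--     Args:
--         lines: Current file lines.
--         changespec_name: NAME of the ChangeSpec to update.
--         new_status: New STATUS value.
--
--     Returns:
--         Updated file content as a string.
--     """
--     updated_lines = []
--     in_target_changespec = False
--
--     for line in lines:
--         # Check if this is a NAME field
--         if line.startswith("NAME:"):
--             current_name = line.split(":", 1)[1].strip()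
--             in_target_changespec = current_name == changespec_name
--
--         # Update STATUS if we're in the target ChangeSpec
--         if in_target_changespec and line.startswith("STATUS:"):
--             # Replace the STATUS line
--             updated_lines.append(f"STATUS: {new_status}\n")
--             in_target_changespec = False  # Done updating this ChangeSpec
--         else:
--             updated_lines.append(line)
--
--     return "".join(updated_lines)
-- ===== SOURCE B (Python) =====
-- def _apply_status_update(
--     lines: list[str], changespec_name: str, new_status: str
-- ) -> str:
--     """Apply STATUS field update to file lines (index-then-rewrite)."""
--     # Pass 1: locate the index of the first STATUS line of each matching block.
--     targets = set()
--     waiting = False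
--     for i, line in enumerate(lines):
--         if line.startswith("NAME:"):
--             waiting = line.split(":", 1)[1].strip() == changespec_name
--         elif waiting and line.startswith("STATUS:"):
--             targets.add(i)
--             waiting = False
--     # Pass 2: rebuild the content, replacing exactly the located lines.
--     return "".join(
--         f"STATUS: {new_status}\n" if i in targets else line
--         for i, line in enumerate(lines)
--     )
-- ===== Notes on version B (the rewrite author's own statement) =====
-- stated objective: alternative
-- what changed: Replaces the single interleaved state machine that edits lines as it scans with a two-pass index-then-rewrite: a first pass collects into a set the index of the first STATUS line of each matching NAME block, a second pass rebuilds the output by index lookup.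
import Mathlib
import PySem

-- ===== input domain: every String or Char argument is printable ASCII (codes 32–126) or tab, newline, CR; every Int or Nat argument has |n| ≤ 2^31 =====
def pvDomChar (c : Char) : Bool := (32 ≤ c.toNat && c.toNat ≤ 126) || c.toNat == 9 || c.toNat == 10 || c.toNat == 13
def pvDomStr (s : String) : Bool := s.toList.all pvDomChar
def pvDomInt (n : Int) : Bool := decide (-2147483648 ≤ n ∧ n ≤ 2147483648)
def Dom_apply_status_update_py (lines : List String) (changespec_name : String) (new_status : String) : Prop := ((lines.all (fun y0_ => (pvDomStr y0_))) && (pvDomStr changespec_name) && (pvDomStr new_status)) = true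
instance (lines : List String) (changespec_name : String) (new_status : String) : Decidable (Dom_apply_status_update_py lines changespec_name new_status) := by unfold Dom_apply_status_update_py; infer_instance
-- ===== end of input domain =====

-- B replaces A's interleaved edit-while-scanning state machine with a two-pass
-- index-then-rewrite (collect the target indices into a set, then rebuild by lookup);
-- same cost, different decomposition.

-- ===== PORT A =====
-- current_name = line.split(":", 1)[1].strip()  (the [1] exists whenever the
-- "NAME:" guard holds, so the pyGetD default is never consulted)
def pvName (line changespec_name : String) : Bool :=
  PySem.Str.strip (PySem.List.pyGetD ((PySem.Str.splitMax? line ":" 1).getD []) 1 "") == changespec_name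

-- loop body of A's single for-loop, on state (updated_lines, in_target_changespec)
def pvAStep (changespec_name new_status : String) (st : List String × Bool) (line : String) :
    List String × Bool :=
  let in_target := if PySem.Str.startswith line "NAME:" then pvName line changespec_name else st.2
  if in_target && PySem.Str.startswith line "STATUS:" then
    (st.1 ++ ["STATUS: " ++ new_status ++ "\n"], false)
  else
    (st.1 ++ [line], in_target)

def apply_status_update_py (lines : List String) (changespec_name : String) (new_status : String) : String :=
  PySem.Str.join "" (lines.foldl (pvAStep changespec_name new_status) ([], false)).1

-- ===== PORT B =====
-- loop body of B's first pass, on state (targets, waiting)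
def pvBStep (changespec_name : String) (st : PySem.Set Int × Bool) (p : Int × String) :
    PySem.Set Int × Bool :=
  if PySem.Str.startswith p.2 "NAME:" then
    (st.1, pvName p.2 changespec_name)
  else if st.2 && PySem.Str.startswith p.2 "STATUS:" then
    (PySem.Set.add st.1 p.1, false)
  else st

def apply_status_update_py_alt (lines : List String) (changespec_name : String) (new_status : String) : String :=
  let targets := ((PySem.List.enumerate lines 0).foldl (pvBStep changespec_name) (PySem.Set.empty, false)).1
  PySem.Str.join "" ((PySem.List.enumerate lines 0).map
    (fun p => if PySem.Set.contains targets p.1 then "STATUS: " ++ new_status ++ "\n" else p.2))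

-- ===== PRECONDITION & SPEC =====
def Spec_apply_status_update_py (lines : List String) (changespec_name : String) (new_status : String) (out : String) : Prop := out = apply_status_update_py_alt lines changespec_name new_status
instance (lines : List String) (changespec_name : String) (new_status : String) (out : String) : Decidable (Spec_apply_status_update_py lines changespec_name new_status out) := by unfold Spec_apply_status_update_py; infer_instance

-- ===== CLAIM (what is proved, stated in full; the proofs are below) =====
def Claim_equal_apply_status_update_py : Prop := ∀ (lines : List String) (changespec_name : String) (new_status : String), Dom_apply_status_update_py lines changespec_name new_status → Spec_apply_status_update_py lines changespec_name new_status (apply_status_update_py lines changespec_name new_status)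

-- ===== LEMMAS AND PROOFS =====

-- A's output, per line, as a structural recursion on the remaining lines and the flag
def pvAOut (changespec_name new_status : String) : List String → Bool → List String
  | [], _ => []
  | l :: ls, w =>
    let w1 := if PySem.Str.startswith l "NAME:" then pvName l changespec_name else w
    if w1 && PySem.Str.startswith l "STATUS:" then
      ("STATUS: " ++ new_status ++ "\n") :: pvAOut changespec_name new_status ls false
    else
      l :: pvAOut changespec_name new_status ls w1

theorem pvA_foldl_eq (changespec_name new_status : String) :
    ∀ (ls : List String) (acc : List String) (w : Bool),
      (ls.foldl (pvAStep changespec_name new_status) (acc, w)).1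
        = acc ++ pvAOut changespec_name new_status ls w := by
  intro ls
  induction ls with
  | nil => intro acc w; simp [pvAOut]
  | cons l ls ih =>
    intro acc w
    rw [List.foldl_cons]
    by_cases h : ((if PySem.Str.startswith l "NAME:" then pvName l changespec_name else w)
        && PySem.Str.startswith l "STATUS:") = true
    · have hstep : pvAStep changespec_name new_status (acc, w) l
          = (acc ++ ["STATUS: " ++ new_status ++ "\n"], false) := by
        unfold pvAStep; rw [if_pos h]
      have hout : pvAOut changespec_name new_status (l :: ls) w
          = ("STATUS: " ++ new_status ++ "\n") :: pvAOut changespec_name new_status ls false := by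
        simp only [pvAOut]; rw [if_pos h]
      rw [hstep, hout, ih]
      simp
    · have hstep : pvAStep changespec_name new_status (acc, w) l
          = (acc ++ [l], if PySem.Str.startswith l "NAME:" then pvName l changespec_name else w) := by
        unfold pvAStep; rw [if_neg h]
      have hout : pvAOut changespec_name new_status (l :: ls) w
          = l :: pvAOut changespec_name new_status ls
              (if PySem.Str.startswith l "NAME:" then pvName l changespec_name else w) := by
        simp only [pvAOut]; rw [if_neg h]
      rw [hstep, hout, ih]
      simp

-- a line starting with "NAME:" does not start with "STATUS:"
theorem pvName_not_status (l : String) (h : PySem.Str.startswith l "NAME:" = true) :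
    PySem.Str.startswith l "STATUS:" = false := by
  simp only [PySem.Str.startswith_eq] at h ⊢
  rw [PySem.Chars.startswith_iff] at h
  by_contra hc
  rw [Bool.not_eq_false, PySem.Chars.startswith_iff] at hc
  obtain ⟨t1, h1⟩ := h
  obtain ⟨t2, h2⟩ := hc
  have e1 : "NAME:".toList = ['N', 'A', 'M', 'E', ':'] := by decide
  have e2 : "STATUS:".toList = ['S', 'T', 'A', 'T', 'U', 'S', ':'] := by decide
  rw [e1] at h1
  rw [e2] at h2
  rw [← h2] at h1
  simp at h1

-- pass-1 only ever ADDS indices drawn from the enumerated pairs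
theorem pvB_mem_fold (changespec_name : String) :
    ∀ (ps : List (Int × String)) (tg : PySem.Set Int) (w : Bool) (j : Int),
      j ∈ (ps.foldl (pvBStep changespec_name) (tg, w)).1 → j ∈ tg ∨ j ∈ ps.map Prod.fst := by
  intro ps
  induction ps with
  | nil => intro tg w j h; simpa using h
  | cons p ps ih =>
    intro tg w j h
    simp only [List.foldl_cons] at h
    simp only [pvBStep] at h
    split at h
    · rcases ih _ _ _ h with h' | h' <;> simp [h']
    · split at h
      · rcases ih _ _ _ h with h' | h'
        · rcases (PySem.Set.mem_add _ _ _).1 h' with h'' | h'' <;> simp [h'']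
        · simp [h']
      · rcases ih _ _ _ h with h' | h' <;> simp [h']

-- pass-1 never removes an index
theorem pvB_mem_fold_mono (changespec_name : String) :
    ∀ (ps : List (Int × String)) (tg : PySem.Set Int) (w : Bool) (j : Int),
      j ∈ tg → j ∈ (ps.foldl (pvBStep changespec_name) (tg, w)).1 := by
  intro ps
  induction ps with
  | nil => intro tg w j h; simpa using h
  | cons p ps ih =>
    intro tg w j h
    simp only [List.foldl_cons, pvBStep]
    split
    · exact ih _ _ _ h
    · split
      · exact ih _ _ _ ((PySem.Set.mem_add _ _ _).2 (Or.inl h))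
      · exact ih _ _ _ h

-- on an index below every enumerated index, the final set agrees with the initial one
theorem pvB_contains_lt (changespec_name : String) (ls : List String) (k : Int)
    (tg : PySem.Set Int) (w : Bool) (j : Int) (hj : j < k + 1) :
    PySem.Set.contains ((PySem.List.enumerate ls (k + 1)).foldl (pvBStep changespec_name) (tg, w)).1 j
      = PySem.Set.contains tg j := by
  by_cases hm : j ∈ tg
  · rw [(PySem.Set.contains_iff _ _).2 hm,
      (PySem.Set.contains_iff _ _).2 (pvB_mem_fold_mono changespec_name _ _ _ _ hm)]
  · have h2 : j ∉ ((PySem.List.enumerate ls (k + 1)).foldl (pvBStep changespec_name) (tg, w)).1 := by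
      intro h
      rcases pvB_mem_fold changespec_name _ _ _ _ h with h' | h'
      · exact hm h'
      · rcases List.mem_map.1 h' with ⟨p, hp, rfl⟩
        rcases (PySem.List.mem_enumerate_iff _ _ _).1 hp with ⟨m, hmlt, rfl⟩
        simp at hj
        omega
    cases hc1 : PySem.Set.contains ((PySem.List.enumerate ls (k + 1)).foldl (pvBStep changespec_name) (tg, w)).1 j with
    | true => exact absurd ((PySem.Set.contains_iff _ _).1 hc1) h2
    | false =>
      cases hc2 : PySem.Set.contains tg j with
      | true => exact absurd ((PySem.Set.contains_iff _ _).1 hc2) hm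
      | false => rfl

-- the heart: B's second pass, written against the full pass-1 fold, equals A's per-line output
theorem pvKey (changespec_name new_status : String) :
    ∀ (ls : List String) (k : Int) (tg : PySem.Set Int) (w : Bool),
      (∀ j ∈ tg, j < k) →
      ((PySem.List.enumerate ls k).map
          (fun p => if PySem.Set.contains ((PySem.List.enumerate ls k).foldl (pvBStep changespec_name) (tg, w)).1 p.1
            then "STATUS: " ++ new_status ++ "\n" else p.2))
        = pvAOut changespec_name new_status ls w := by
  intro ls
  induction ls with
  | nil => intro k tg w _; simp [PySem.List.enumerate_nil, pvAOut]
  | cons l ls ih =>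
    intro k tg w hk
    have hkno : PySem.Set.contains tg k = false := by
      cases hc : PySem.Set.contains tg k with
      | false => rfl
      | true =>
        exact absurd (hk k ((PySem.Set.contains_iff _ _).1 hc)) (lt_irrefl k)
    simp only [PySem.List.enumerate_cons, List.foldl_cons, List.map_cons]
    by_cases hn : PySem.Str.startswith l "NAME:" = true
    · have hs := pvName_not_status l hn
      have hstep : pvBStep changespec_name (tg, w) (k, l) = (tg, pvName l changespec_name) := by
        unfold pvBStep; rw [if_pos hn]
      have hout : pvAOut changespec_name new_status (l :: ls) w
          = l :: pvAOut changespec_name new_status ls (pvName l changespec_name) := by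
        simp only [pvAOut]
        rw [hn, if_pos rfl, if_neg (by rw [hs, Bool.and_false]; exact Bool.false_ne_true)]
      have hcont := pvB_contains_lt changespec_name ls k tg (pvName l changespec_name) k (by omega)
      have hklt : ∀ j ∈ tg, j < k + 1 := fun j hj => by have := hk j hj; omega
      simp only [hstep, hcont, hkno, hout]
      rw [if_neg (by simp), ih (k + 1) tg (pvName l changespec_name) hklt]
    · have hn' : PySem.Str.startswith l "NAME:" = false := by simpa using hn
      by_cases hws : (w && PySem.Str.startswith l "STATUS:") = true
      · have hstep : pvBStep changespec_name (tg, w) (k, l) = (PySem.Set.add tg k, false) := by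
          unfold pvBStep
          rw [if_neg (by rw [hn']; exact Bool.false_ne_true), if_pos hws]
        have hout : pvAOut changespec_name new_status (l :: ls) w
            = ("STATUS: " ++ new_status ++ "\n") :: pvAOut changespec_name new_status ls false := by
          simp only [pvAOut]
          rw [hn', if_neg Bool.false_ne_true, if_pos hws]
        have hklt : ∀ j ∈ PySem.Set.add tg k, j < k + 1 := by
          intro j hj
          rcases (PySem.Set.mem_add _ _ _).1 hj with h' | h'
          · have := hk j h'; omega
          · omega
        have hkyes : PySem.Set.contains (PySem.Set.add tg k) k = true :=
          (PySem.Set.contains_iff _ _).2 ((PySem.Set.mem_add _ _ _).2 (Or.inr rfl))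
        have hcont := pvB_contains_lt changespec_name ls k (PySem.Set.add tg k) false k (by omega)
        simp only [hstep, hcont, hkyes, hout]
        rw [if_pos (by trivial), ih (k + 1) (PySem.Set.add tg k) false hklt]
      · have hstep : pvBStep changespec_name (tg, w) (k, l) = (tg, w) := by
          unfold pvBStep
          rw [if_neg (by rw [hn']; exact Bool.false_ne_true), if_neg hws]
        have hout : pvAOut changespec_name new_status (l :: ls) w
            = l :: pvAOut changespec_name new_status ls w := by
          simp only [pvAOut]
          rw [hn', if_neg Bool.false_ne_true, if_neg hws]
        have hcont := pvB_contains_lt changespec_name ls k tg w k (by omega)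
        have hklt : ∀ j ∈ tg, j < k + 1 := fun j hj => by have := hk j hj; omega
        simp only [hstep, hcont, hkno, hout]
        rw [if_neg (by simp), ih (k + 1) tg w hklt]

-- ===== VERDICT (by name: the statement is the Claim_ definition above) =====
theorem apply_status_update_py_spec : Claim_equal_apply_status_update_py := by
  intro lines changespec_name new_status _
  unfold Spec_apply_status_update_py
  have hA : apply_status_update_py lines changespec_name new_status
      = PySem.Str.join "" (pvAOut changespec_name new_status lines false) := by
    unfold apply_status_update_py
    rw [pvA_foldl_eq changespec_name new_status lines [] false, List.nil_append]
  have hB := pvKey changespec_name new_status lines 0 PySem.Set.empty false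
    (by intro j hj; simp [PySem.Set.empty] at hj)
  rw [hA]
  show PySem.Str.join "" (pvAOut changespec_name new_status lines false)
      = PySem.Str.join "" ((PySem.List.enumerate lines 0).map
          (fun p => if PySem.Set.contains
              (((PySem.List.enumerate lines 0).foldl (pvBStep changespec_name) (PySem.Set.empty, false)).1) p.1
            then "STATUS: " ++ new_status ++ "\n" else p.2))
  exact (congrArg (PySem.Str.join "") hB).symm
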